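-- pv_equiv track=rewrite | github.com/jm1261/MicroscopyPeriodAnalysis | 1DGratingAnalysis.py | SEMDict
-- ===== SOURCE A (Python) =====
-- def SEMDict(lines):
--     '''
--     Read lines from SEM output txt file and pulls important parameters into
--     dictionary. To further add parameters, simply add names and keys to the
--     sample dictionary in this function. Remember FULL_SIZE parameter is [width,
--     height].
--     Args:
--         lines: <array> array of lines from txt file, stripped of '$' and '\n'
--     Returns:
--         parameterdict: <dict> parameter dictionary
--     '''
--     parameterdict = {
--         'SM_EMI_CURRENT': None,
--         'CM_ACCEL_VOLT': None,
--         'SM_WD': None,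
--         'CM_MAG': None,
--         'CM_BRIGHTNESS': None,
--         'CM_CONTRAST': None,
--         'CM_FULL_SIZE': None,
--         'SM_MICRON_BAR': None,
--         'SM_MICRON_MARKER': None}
--     for line in lines:
--         splitline = line.split(' ')
--         if splitline[0] in parameterdict.keys():
--             parameterdict[f'{splitline[0]}'] = splitline[1:]
--     return parameterdict
-- ===== SOURCE B (Python) =====
-- _KEYS = ('SM_EMI_CURRENT', 'CM_ACCEL_VOLT', 'SM_WD', 'CM_MAG',
--          'CM_BRIGHTNESS', 'CM_CONTRAST', 'CM_FULL_SIZE',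
--          'SM_MICRON_BAR', 'SM_MICRON_MARKER')
--
--
-- def SEMDict(lines):
--     '''Key-major search: for each parameter name, scan the lines from the end
--     and take the first (i.e. overall last) line whose first token is that name.
--     No dict of lines is ever built.'''
--     def find(name):
--         for line in reversed(lines):
--             parts = line.split(' ')
--             if parts[0] == name:
--                 return parts[1:]
--         return None
--     return {name: find(name) for name in _KEYS}
-- ===== Notes on version B (the rewrite author's own statement) =====
-- stated objective: alternative
-- what changed: A makes one line-major pass mutating a pre-seeded dict (membership test + overwrite); B builds no table at all: it is key-major, doing for each of the nine parameter names an independent reverse scan of the lines that returns at the first (i.e. last-occurring) match, so there is no dict of lines, no membership test and no mutation.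
import Mathlib
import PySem

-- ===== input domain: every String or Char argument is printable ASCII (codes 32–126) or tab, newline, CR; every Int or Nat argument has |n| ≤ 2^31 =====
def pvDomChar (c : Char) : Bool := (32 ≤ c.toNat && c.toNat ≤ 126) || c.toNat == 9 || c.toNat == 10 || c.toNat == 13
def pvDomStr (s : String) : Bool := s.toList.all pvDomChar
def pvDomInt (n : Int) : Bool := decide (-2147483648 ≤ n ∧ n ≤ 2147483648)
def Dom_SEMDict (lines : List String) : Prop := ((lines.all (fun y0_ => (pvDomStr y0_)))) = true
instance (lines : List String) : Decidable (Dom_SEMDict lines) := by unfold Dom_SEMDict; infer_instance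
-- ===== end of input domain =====

-- B is key-major: for each of the nine parameter names it does an independent
-- reverse scan of the lines and returns at the first (= overall last) match —
-- no table of lines, no membership test, no mutated dict (alternative; same cost class).

-- ===== PORT A =====
-- the dict literal of A (nine parameters, all initially None)
def SEMDict (lines : List String) : List (String × Option (List String)) :=
  let parameterdict : PySem.Dict String (Option (List String)) :=
    PySem.Dict.ofList
      [("SM_EMI_CURRENT", none), ("CM_ACCEL_VOLT", none), ("SM_WD", none),
       ("CM_MAG", none), ("CM_BRIGHTNESS", none), ("CM_CONTRAST", none),
       ("CM_FULL_SIZE", none), ("SM_MICRON_BAR", none), ("SM_MICRON_MARKER", none)]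
  (lines.foldl (fun d line =>
      let splitline := (PySem.Str.split? line " ").getD []
      match PySem.List.pyGet? splitline 0 with
      | none => d          -- unreachable: split(' ') is never empty
      | some h =>
          if d.contains h then
            d.insert h (some (PySem.List.slice splitline (some 1) none))
          else d)
    parameterdict).items

-- ===== PORT B =====
-- the _KEYS tuple of Source B
def pvKeys : List String :=
  ["SM_EMI_CURRENT", "CM_ACCEL_VOLT", "SM_WD", "CM_MAG", "CM_BRIGHTNESS",
   "CM_CONTRAST", "CM_FULL_SIZE", "SM_MICRON_BAR", "SM_MICRON_MARKER"]

-- Source B's find(name): 'for line in reversed(lines): … return parts[1:]' =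
-- first match over the reversed list (findSome? is that loop)
def pvFind (name : String) (lines : List String) : Option (List String) :=
  lines.reverse.findSome? (fun line =>
    match (PySem.Str.split? line " ").getD [] with
    | [] => none           -- unreachable: split(' ') is never empty
    | h :: tl => if h == name then some tl else none)

def SEMDict_alt (lines : List String) : List (String × Option (List String)) :=
  -- {name: find(name) for name in _KEYS}
  pvKeys.map (fun name => (name, pvFind name lines))

-- ===== PRECONDITION & SPEC =====
def Spec_SEMDict (lines : List String) (out : List (String × Option (List String))) : Prop := out = SEMDict_alt lines
instance (lines : List String) (out : List (String × Option (List String))) : Decidable (Spec_SEMDict lines out) := by unfold Spec_SEMDict; infer_instance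

-- ===== CLAIM (what is proved, stated in full; the proofs are below) =====
def Claim_equal_SEMDict : Prop := ∀ (lines : List String), Dom_SEMDict lines → Spec_SEMDict lines (SEMDict lines)

-- ===== LEMMAS AND PROOFS =====

-- loop invariant for A: A's dict always has exactly the nine keys, and its value
-- at each key is what B's reverse search on the remaining lines, falling back to
-- the value already stored, would give
theorem pv_loop (lines : List String)
    (d : PySem.Dict String (Option (List String)))
    (hk : d.keys = pvKeys) :
    (lines.foldl (fun d line =>
        let splitline := (PySem.Str.split? line " ").getD []
        match PySem.List.pyGet? splitline 0 with
        | none => d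
        | some h =>
            if d.contains h then
              d.insert h (some (PySem.List.slice splitline (some 1) none))
            else d) d)
      =
    PySem.Dict.mk (pvKeys.map (fun name => (name,
      ((pvFind name lines).map some).getD (d.getD name none)))) := by
  induction lines generalizing d with
  | nil =>
      simp only [List.foldl_nil, pvFind, List.reverse_nil, List.findSome?_nil,
        Option.map_none, Option.getD_none]
      apply PySem.Dict.ext
      have hnd : d.keys.Nodup := by rw [hk]; decide
      have hit := PySem.Dict.items_eq_map_keys d hnd none
      rw [hit, hk]
  | cons line rest ih =>
      simp only [List.foldl_cons]
      have hrev : ∀ name, pvFind name (line :: rest)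
          = (pvFind name rest).or
              (match (PySem.Str.split? line " ").getD [] with
               | [] => none
               | h :: tl => if h == name then some tl else none) := by
        intro name
        simp [pvFind, List.findSome?_append]
      cases hsp : (PySem.Str.split? line " ").getD [] with
      | nil =>
          refine Eq.trans (ih d hk) ?_
          congr 1
          apply List.map_congr_left
          intro k _
          rw [hrev k, hsp]
          simp
      | cons h tl =>
          have hget : PySem.List.pyGet? (h :: tl) (0 : Int) = some h := by
            simp [PySem.List.pyGet?, PySem.List.pyIdx?]
          simp only [hget]
          have hcont : d.contains h = decide (h ∈ pvKeys) := by
            rw [PySem.Dict.contains_eq_decide_mem_keys, hk]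
          by_cases hmem : h ∈ pvKeys
          · rw [hcont]
            simp only [hmem, decide_true, if_true]
            have hsl : PySem.List.slice (h :: tl) (some 1) none = tl := by
              rw [PySem.List.slice_from_one]; rfl
            rw [hsl]
            have hins : (d.insert h (some tl)).keys = pvKeys := by
              rw [PySem.Dict.keys_insert_of_contains, hk]
              rw [hcont]; simp [hmem]
            refine Eq.trans (ih (d.insert h (some tl)) hins) ?_
            congr 1
            apply List.map_congr_left
            intro k _
            rw [hrev k, hsp]
            by_cases hke : k = h
            · subst hke
              simp [PySem.Dict.getD_insert_self, Option.or]
              cases pvFind k rest <;> simp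
            · have hbk : (h == k) = false := by
                rw [beq_eq_false_iff_ne]; intro e; exact hke e.symm
              simp [hbk, PySem.Dict.getD_insert_of_ne (hne := hke)]
          · rw [hcont]
            simp only [hmem, decide_false]
            refine Eq.trans (ih d hk) ?_
            congr 1
            apply List.map_congr_left
            intro k hkm
            rw [hrev k, hsp]
            have hbk : (h == k) = false := by
              rw [beq_eq_false_iff_ne]; intro e; exact hmem (e ▸ hkm)
            simp [hbk]

-- ===== VERDICT (by name: the statement is the Claim_ definition above) =====
theorem SEMDict_spec : Claim_equal_SEMDict := by
  intro lines _
  unfold Spec_SEMDict SEMDict SEMDict_alt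
  refine Eq.trans (congrArg PySem.Dict.items
    (pv_loop lines (PySem.Dict.ofList
      [("SM_EMI_CURRENT", none), ("CM_ACCEL_VOLT", none), ("SM_WD", none),
       ("CM_MAG", none), ("CM_BRIGHTNESS", none), ("CM_CONTRAST", none),
       ("CM_FULL_SIZE", none), ("SM_MICRON_BAR", none), ("SM_MICRON_MARKER", none)])
      (by decide))) ?_
  have hi : ∀ (L : List (String × Option (List String))), (PySem.Dict.mk L).items = L :=
    fun _ => rfl
  rw [hi]
  apply List.map_congr_left
  intro k hk
  have hD : (PySem.Dict.ofList
      [("SM_EMI_CURRENT", (none : Option (List String))), ("CM_ACCEL_VOLT", none), ("SM_WD", none),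
       ("CM_MAG", none), ("CM_BRIGHTNESS", none), ("CM_CONTRAST", none),
       ("CM_FULL_SIZE", none), ("SM_MICRON_BAR", none), ("SM_MICRON_MARKER", none)]).getD k none = none := by
    fin_cases hk <;> decide
  rw [hD]
  cases pvFind k lines <;> rfl
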